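-- pv_equiv track=rewrite | github.com/Flow-Research/harnessy | tools/flow-install/skills/issue-flow/scripts/issue_flow_git.py | sanitize_branch_name
-- ===== SOURCE A (Python) =====
-- def sanitize_branch_name(raw: str) -> str:
--     allowed = []
--     last_sep = False
--     for char in raw.lower():
--         if char.isalnum() or char in {"-", "_"}:
--             allowed.append(char)
--             last_sep = False
--         else:
--             if not last_sep:
--                 allowed.append("-")
--                 last_sep = True
--     sanitized = "".join(allowed).strip("-_")
--     while "--" in sanitized:
--         sanitized = sanitized.replace("--", "-")
--     return sanitized
-- ===== SOURCE B (Python) =====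
-- import re
--
-- def sanitize_branch_name(raw: str) -> str:
--     s = re.sub(r'[^a-z0-9_-]+', '-', raw.lower())
--     s = s.strip('-_')
--     return re.sub(r'-+', '-', s)
-- ===== Notes on version B (the rewrite author's own statement) =====
-- stated objective: simpler
-- what changed: Replaced the char-by-char state machine with a last-separator flag plus the repeated dash-dash replace loop by two regex substitutions: collapse each run of disallowed characters to one dash, strip leading/trailing dashes and underscores, then collapse dash runs in a single pass.
import Mathlib
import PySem

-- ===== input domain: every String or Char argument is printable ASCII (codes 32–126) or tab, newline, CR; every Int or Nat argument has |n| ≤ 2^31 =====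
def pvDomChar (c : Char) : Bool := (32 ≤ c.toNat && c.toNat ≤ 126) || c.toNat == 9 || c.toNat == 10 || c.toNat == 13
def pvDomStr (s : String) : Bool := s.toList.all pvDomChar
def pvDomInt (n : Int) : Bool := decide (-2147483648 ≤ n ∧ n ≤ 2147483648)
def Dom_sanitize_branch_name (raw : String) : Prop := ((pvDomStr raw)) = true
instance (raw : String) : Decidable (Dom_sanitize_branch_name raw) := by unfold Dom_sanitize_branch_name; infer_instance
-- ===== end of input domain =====

-- B replaces A's char-by-char state machine and repeated '--'-replace loop by two regex
-- substitutions (collapse runs of disallowed chars to one dash, strip '-_', collapse dash runs);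
-- objective: simpler.

-- ===== PORT A =====
-- one step of A's for-loop; state = (allowed, last_sep)
def pvStepA (st : List Char × Bool) (c : Char) : List Char × Bool :=
  if PySem.Chars.isalnum c || c == '-' || c == '_' then (st.1 ++ [c], false)
  else if !st.2 then (st.1 ++ ['-'], true) else st

-- A's `while "--" in sanitized: sanitized = sanitized.replace("--", "-")`;
-- the Nat fuel (initially the string length) is only a totality guard: every entered
-- iteration strictly shortens the string, so the fuel is never exhausted.
def pvWhileA : Nat → List Char → List Char
  | 0, s => s
  | fuel + 1, s =>
    if PySem.Chars.isIn ['-', '-'] s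
    then pvWhileA fuel (PySem.Chars.replace s ['-', '-'] ['-'])
    else s

def sanitize_branch_name (raw : String) : String :=
  let allowed := (PySem.Chars.lower raw.toList).foldl pvStepA ([], false)
  let sanitized := PySem.Chars.stripChars allowed.1 ['-', '_']
  String.ofList (pvWhileA sanitized.length sanitized)

-- ===== PORT B =====
def pvBad (c : Char) : Bool :=
  !((decide ('a' ≤ c) && decide (c ≤ 'z')) || (decide ('0' ≤ c) && decide (c ≤ '9'))
    || c == '-' || c == '_')

-- re.sub(r'[^a-z0-9_-]+', '-', s): each maximal run of disallowed chars becomes one '-'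
-- (exact for this pattern: leftmost-longest runs, one left-to-right scan)
def pvSubBad : List Char → List Char
  | [] => []
  | c :: t =>
    if pvBad c then '-' :: pvSubBad (t.dropWhile pvBad) else c :: pvSubBad t
termination_by s => s.length
decreasing_by
  · have := List.length_dropWhile_le pvBad t; simp; omega
  · simp

-- re.sub(r'-+', '-', s): each maximal run of dashes becomes one dash
def pvSubDash : List Char → List Char
  | [] => []
  | c :: t =>
    if c == '-' then '-' :: pvSubDash (t.dropWhile (· == '-')) else c :: pvSubDash t
termination_by s => s.length
decreasing_by
  · have := List.length_dropWhile_le (· == '-') t; simp; omega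
  · simp

def sanitize_branch_name_alt (raw : String) : String :=
  let s := pvSubBad (PySem.Chars.lower raw.toList)
  let s := PySem.Chars.stripChars s ['-', '_']
  String.ofList (pvSubDash s)

-- ===== PRECONDITION & SPEC =====
def Spec_sanitize_branch_name (raw : String) (out : String) : Prop := out = sanitize_branch_name_alt raw
instance (raw : String) (out : String) : Decidable (Spec_sanitize_branch_name raw out) := by unfold Spec_sanitize_branch_name; infer_instance

-- ===== CLAIM (what is proved, stated in full; the proofs are below) =====
def Claim_equal_sanitize_branch_name : Prop := ∀ (raw : String), Dom_sanitize_branch_name raw → Spec_sanitize_branch_name raw (sanitize_branch_name raw)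

-- ===== LEMMAS AND PROOFS =====

-- lowercasing never yields an uppercase letter
lemma pv_isupper_lower (c : Char) : PySem.Chars.isupper (PySem.Chars.lowerChar c) = false := by
  simp only [PySem.Chars.lowerChar]
  split_ifs with h
  · simp only [PySem.Chars.isupper, Bool.and_eq_true, decide_eq_true_eq] at h
    have h1 : ('A' : Char).toNat ≤ c.toNat := by
      rw [Char.le_def] at h; exact UInt32.le_iff_toNat_le.mp h.1
    have h2 : c.toNat ≤ ('Z' : Char).toNat := by
      rw [Char.le_def] at h; exact UInt32.le_iff_toNat_le.mp h.2
    have hA : ('A' : Char).toNat = 65 := rfl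
    have hZ : ('Z' : Char).toNat = 90 := rfl
    have hval : (Char.ofNat (c.toNat + 32)).toNat = c.toNat + 32 := by
      have hv : Nat.isValidChar (c.toNat + 32) := Or.inl (by omega)
      unfold Char.ofNat
      rw [dif_pos hv]
      rfl
    simp only [PySem.Chars.isupper, Bool.and_eq_false_iff, decide_eq_false_iff_not]
    right
    intro hle
    have : (Char.ofNat (c.toNat + 32)).toNat ≤ ('Z' : Char).toNat := by
      rw [Char.le_def] at hle; exact UInt32.le_iff_toNat_le.mp hle
    omega
  · simpa using h
  
-- A's per-char test agrees with B's character class on every lowercased char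
lemma pv_test_eq (c : Char) :
    (PySem.Chars.isalnum (PySem.Chars.lowerChar c) || PySem.Chars.lowerChar c == '-'
      || PySem.Chars.lowerChar c == '_')
    = !pvBad (PySem.Chars.lowerChar c) := by
  simp only [PySem.Chars.isalnum, PySem.Chars.isalpha, PySem.Chars.isdigit,
    PySem.Chars.islower, pv_isupper_lower, pvBad, Bool.false_or, Bool.not_not, Bool.or_assoc]

-- A's fold with the last_sep flag computes exactly B's first regex substitution
lemma pv_fold_eq (l : List Char) (h : ∀ c ∈ l,
    (PySem.Chars.isalnum c || c == '-' || c == '_') = !pvBad c) (acc : List Char) :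
    ((l.foldl pvStepA (acc, false)).1 = acc ++ pvSubBad l)
    ∧ ((l.foldl pvStepA (acc, true)).1 = acc ++ pvSubBad (l.dropWhile pvBad)) := by
  induction l generalizing acc with
  | nil => simp [pvSubBad]
  | cons c t ih =>
    have hc := h c (List.mem_cons_self ..)
    have ht : ∀ c ∈ t, (PySem.Chars.isalnum c || c == '-' || c == '_') = !pvBad c :=
      fun x hx => h x (List.mem_cons_of_mem _ hx)
    constructor
    · by_cases hb : pvBad c = true
      · have hg : (PySem.Chars.isalnum c || c == '-' || c == '_') = false := by
          rw [hc, hb]; rfl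
        simp only [List.foldl_cons, pvStepA, hg, Bool.false_eq_true, if_false,
          Bool.not_false, if_true]
        rw [(ih ht (acc ++ ['-'])).2]
        simp [pvSubBad, hb]
      · have hg : (PySem.Chars.isalnum c || c == '-' || c == '_') = true := by
          rw [hc]; simp [hb]
        simp only [List.foldl_cons, pvStepA, hg, if_true]
        rw [(ih ht (acc ++ [c])).1]
        simp [pvSubBad, hb]
    · by_cases hb : pvBad c = true
      · have hg : (PySem.Chars.isalnum c || c == '-' || c == '_') = false := by
          rw [hc, hb]; rfl
        simp only [List.foldl_cons, pvStepA, hg, Bool.false_eq_true, if_false,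
          Bool.not_true, Bool.false_eq_true, if_false]
        rw [(ih ht acc).2]
        simp [hb]
      · have hg : (PySem.Chars.isalnum c || c == '-' || c == '_') = true := by
          rw [hc]; simp [hb]
        simp only [List.foldl_cons, pvStepA, hg, if_true]
        rw [(ih ht (acc ++ [c])).1]
        simp [hb, pvSubBad]

-- replace-all of "--" by "-", as a plain structural recursion (spec of A's replace call)
def pvReplDD : List Char → List Char
  | [] => []
  | [c] => [c]
  | c :: d :: t =>
    if c = '-' ∧ d = '-' then '-' :: pvReplDD t else c :: pvReplDD (d :: t)

lemma pvReplDD_cons (c : Char) (t : List Char) (h : ¬ (['-', '-'] <+: c :: t)) :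
    pvReplDD (c :: t) = c :: pvReplDD t := by
  match t with
  | [] => rfl
  | d :: u =>
    rw [pvReplDD, if_neg]
    rintro ⟨rfl, rfl⟩
    exact h ⟨u, rfl⟩

lemma pvReplDD_dd (t : List Char) : pvReplDD ('-' :: '-' :: t) = '-' :: pvReplDD t := by
  rw [pvReplDD, if_pos ⟨rfl, rfl⟩]

lemma pv_go_spec (fuel : Nat) : ∀ (l acc : List Char), l.length ≤ fuel →
    PySem.Chars.replace.go ['-', '-'] ['-'] fuel l acc = acc.reverse ++ pvReplDD l := by
  induction fuel with
  | zero =>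
    intro l acc hl
    have : l = [] := List.eq_nil_of_length_eq_zero (Nat.le_zero.mp hl)
    subst this
    rw [PySem.Chars.replace.go]
    simp [pvReplDD]
  | succ f ih =>
    intro l acc hl
    match l with
    | [] =>
      rw [PySem.Chars.replace.go]
      simp [pvReplDD]
      omega
    | c :: t =>
      rw [PySem.Chars.replace.go]
      by_cases hp : ['-', '-'].isPrefixOf (c :: t) = true
      · rw [if_pos hp]
        rcases List.isPrefixOf_iff_prefix.mp hp with ⟨r, hr⟩
        obtain ⟨rfl, rfl⟩ : c = '-' ∧ t = '-' :: r := by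
          injection hr with h1 h2
          exact ⟨h1.symm, h2.symm⟩
        have hlen : r.length ≤ f := by simp at hl; omega
        rw [ih _ _ (by simpa using hlen)]
        simp [pvReplDD_dd]
      · rw [if_neg hp]
        rw [ih t (c :: acc) (by simp at hl; omega)]
        rw [pvReplDD_cons c t (fun hpre => hp (List.isPrefixOf_iff_prefix.mpr hpre))]
        simp

lemma pv_replace_eq (s : List Char) :
    PySem.Chars.replace s ['-', '-'] ['-'] = pvReplDD s := by
  rw [PySem.Chars.replace]
  rw [if_neg (by decide)]
  simpa using pv_go_spec s.length s [] le_rfl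

lemma pv_len_replDD_le (s : List Char) : (pvReplDD s).length ≤ s.length := by
  induction s using pvReplDD.induct with
  | case1 => simp [pvReplDD]
  | case2 c => simp [pvReplDD]
  | case3 c d t h ih =>
    obtain ⟨rfl, rfl⟩ := h
    rw [pvReplDD_dd]
    simp
    omega
  | case4 c d t h ih =>
    rw [pvReplDD, if_neg h]
    simpa using ih

lemma pv_len_replDD_lt (s : List Char) (h : ['-', '-'] <:+: s) :
    (pvReplDD s).length < s.length := by
  induction s using pvReplDD.induct with
  | case1 => have := List.IsInfix.length_le h; simp at this
  | case2 c => have := List.IsInfix.length_le h; simp at this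
  | case3 c d t hcd ih =>
    obtain ⟨rfl, rfl⟩ := hcd
    rw [pvReplDD_dd]
    have := pv_len_replDD_le t
    simp
    omega
  | case4 c d t hcd ih =>
    rw [pvReplDD, if_neg hcd]
    have hti : ['-', '-'] <:+: d :: t := by
      rcases List.infix_cons_iff.mp h with hpre | hinf
      · exfalso
        rcases hpre with ⟨r, hr⟩
        injection hr with h1 h2
        injection h2 with h3 h4
        exact hcd ⟨h1.symm, h3.symm⟩
      · exact hinf
    have := ih hti
    simpa using this

lemma pv_subDash_cons_dash (t : List Char) :
    pvSubDash ('-' :: t) = '-' :: pvSubDash (t.dropWhile (· == '-')) := by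
  rw [pvSubDash]; simp

lemma pv_subDash_cons_ne (c : Char) (t : List Char) (hc : c ≠ '-') :
    pvSubDash (c :: t) = c :: pvSubDash t := by
  rw [pvSubDash]; simp [hc]

-- if s does not start with '-', neither does pvReplDD s
lemma pv_dropDash_replDD_of_ne (s : List Char) (h : ∀ u, s ≠ '-' :: u) :
    (pvReplDD s).dropWhile (· == '-') = pvReplDD s := by
  match s with
  | [] => simp [pvReplDD]
  | c :: t =>
    have hc : c ≠ '-' := fun hc => h t (by rw [hc])
    rw [pvReplDD_cons c t (by rintro ⟨r, hr⟩; injection hr with h1 _; exact hc h1.symm)]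
    simp [hc]

-- the two-regex dash collapse is invariant under one replace-all pass of A's loop
lemma pv_subDash_replDD_strong (n : Nat) : ∀ s : List Char, s.length ≤ n →
    (pvSubDash ((pvReplDD s).dropWhile (· == '-')) = pvSubDash (s.dropWhile (· == '-')))
    ∧ (pvSubDash (pvReplDD s) = pvSubDash s) := by
  induction n with
  | zero =>
    intro s hs
    have : s = [] := List.eq_nil_of_length_eq_zero (Nat.le_zero.mp hs)
    subst this; simp [pvReplDD]
  | succ n ih =>
    intro s hs
    match s with
    | [] => simp [pvReplDD]
    | c :: t =>
      by_cases hc : c = '-'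
      · subst hc
        match t with
        | [] => simp [pvReplDD]
        | d :: u =>
          by_cases hd : d = '-'
          · subst hd
            have hu : u.length ≤ n := by simp at hs; omega
            constructor
            · rw [pvReplDD_dd]
              simp only [List.dropWhile_cons, beq_self_eq_true, if_true]
              exact (ih u hu).1
            · rw [pvReplDD_dd, pv_subDash_cons_dash, pv_subDash_cons_dash]
              simp only [List.dropWhile_cons, beq_self_eq_true, if_true]
              rw [(ih u hu).1]
          · have ht : (d :: u).length ≤ n := by simp at hs; simp; omega
            have h1 : pvReplDD ('-' :: d :: u) = '-' :: pvReplDD (d :: u) := by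
              rw [pvReplDD, if_neg (by rintro ⟨_, h⟩; exact hd h)]
            have hdt : (pvReplDD (d :: u)).dropWhile (· == '-') = pvReplDD (d :: u) :=
              pv_dropDash_replDD_of_ne _ (fun v hv => hd (List.cons_eq_cons.mp hv).1)
            have hdt2 : (d :: u).dropWhile (· == '-') = d :: u := by
              simp [hd]
            constructor
            · rw [h1]
              simp only [List.dropWhile_cons, beq_self_eq_true, if_true]
              rw [hdt, if_neg (by simpa using hd), (ih _ ht).2]
            · rw [h1, pv_subDash_cons_dash, pv_subDash_cons_dash, hdt, hdt2, (ih _ ht).2]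
      · have ht : t.length ≤ n := by simp at hs; omega
        have h1 : pvReplDD (c :: t) = c :: pvReplDD t := by
          rw [pvReplDD_cons c t (by rintro ⟨r, hr⟩; injection hr with h1 _; exact hc h1.symm)]
        constructor
        · rw [h1]
          simp only [List.dropWhile_cons]
          rw [if_neg (by simpa using hc), if_neg (by simpa using hc)]
          rw [pv_subDash_cons_ne c _ hc, pv_subDash_cons_ne c _ hc, (ih t ht).2]
        · rw [h1, pv_subDash_cons_ne c _ hc, pv_subDash_cons_ne c _ hc, (ih t ht).2]

lemma pv_subDash_of_no_dd (s : List Char) (h : ¬ ['-', '-'] <:+: s) : pvSubDash s = s := by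
  induction s with
  | nil => simp [pvSubDash]
  | cons c t ih =>
    have hti : ¬ ['-', '-'] <:+: t := fun ht => h (List.infix_cons ht)
    by_cases hc : c = '-'
    · subst hc
      have hdt : t.dropWhile (· == '-') = t := by
        match t with
        | [] => rfl
        | d :: u =>
          have hd : d ≠ '-' := by
            intro hd; subst hd
            exact h ⟨[], u, rfl⟩
          simp [hd]
      rw [pv_subDash_cons_dash, hdt, ih hti]
    · rw [pv_subDash_cons_ne c t hc, ih hti]

lemma pv_while_eq (fuel : Nat) : ∀ s : List Char, s.length ≤ fuel →
    pvWhileA fuel s = pvSubDash s := by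
  induction fuel with
  | zero =>
    intro s hs
    have : s = [] := List.eq_nil_of_length_eq_zero (Nat.le_zero.mp hs)
    subst this; simp [pvWhileA, pvSubDash]
  | succ f ih =>
    intro s hs
    rw [pvWhileA]
    by_cases hin : PySem.Chars.isIn ['-', '-'] s = true
    · rw [if_pos hin, pv_replace_eq]
      have hinf : ['-', '-'] <:+: s := (PySem.Chars.isIn_iff_infix _ _).mp hin
      have hlt := pv_len_replDD_lt s hinf
      rw [ih _ (by omega)]
      exact (pv_subDash_replDD_strong s.length s le_rfl).2
    · rw [if_neg hin]
      have hni : ¬ ['-', '-'] <:+: s := by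
        intro hinf
        exact hin ((PySem.Chars.isIn_iff_infix _ _).mpr hinf)
      exact (pv_subDash_of_no_dd s hni).symm

-- ===== VERDICT (by name: the statement is the Claim_ definition above) =====
theorem sanitize_branch_name_spec : Claim_equal_sanitize_branch_name := by
  intro raw _
  unfold Spec_sanitize_branch_name sanitize_branch_name sanitize_branch_name_alt
  have hl : ∀ c ∈ PySem.Chars.lower raw.toList,
      (PySem.Chars.isalnum c || c == '-' || c == '_') = !pvBad c := by
    intro c hc
    rcases List.mem_map.mp hc with ⟨c₀, _, rfl⟩
    exact pv_test_eq c₀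
  have hfold := (pv_fold_eq (PySem.Chars.lower raw.toList) hl []).1
  simp only [List.nil_append] at hfold
  simp only [hfold, pv_while_eq _ _ le_rfl]
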